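-- pv_equiv track=rewrite | github.com/machmar/NEN-project | Resources/img_mask_merger.py | combine_interleaved
-- ===== SOURCE A (Python) =====
-- def combine_interleaved(color: list[int], mask: list[int]) -> list[int]:
--     if len(color) != len(mask):
--         raise ValueError(
--             f"Array size mismatch: color={len(color)} bytes, mask={len(mask)} bytes"
--         )
--
--     out = []
--     for c, m in zip(color, mask):
--         out.append(m)
--         out.append(c)
--     return out
-- ===== SOURCE B (Python) =====
-- def combine_interleaved(color: list[int], mask: list[int]) -> list[int]:
--     if len(color) != len(mask):
--         raise ValueError(
--             f"Array size mismatch: color={len(color)} bytes, mask={len(mask)} bytes"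
--         )
--
--     return [mask[i // 2] if i % 2 == 0 else color[i // 2]
--             for i in range(2 * len(color))]
-- ===== Notes on version B (the rewrite author's own statement) =====
-- stated objective: alternative
-- what changed: Replaces the zip loop that appends two elements per pair with a single positional comprehension over range(2*n) that selects mask[i//2] at even indices and color[i//2] at odd ones.
import Mathlib
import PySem

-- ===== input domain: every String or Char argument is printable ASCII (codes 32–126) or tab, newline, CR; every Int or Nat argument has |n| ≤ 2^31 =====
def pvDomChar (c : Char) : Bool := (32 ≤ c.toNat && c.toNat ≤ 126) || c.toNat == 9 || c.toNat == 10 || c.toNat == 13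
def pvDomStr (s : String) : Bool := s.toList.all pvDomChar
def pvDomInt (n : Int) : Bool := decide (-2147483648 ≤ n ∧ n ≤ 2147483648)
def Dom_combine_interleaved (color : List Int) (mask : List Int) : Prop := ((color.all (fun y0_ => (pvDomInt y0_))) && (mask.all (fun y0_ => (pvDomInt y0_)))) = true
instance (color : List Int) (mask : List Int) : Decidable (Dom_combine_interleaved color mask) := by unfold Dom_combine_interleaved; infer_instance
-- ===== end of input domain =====

-- B replaces A's two-appends-per-zip-pair loop by a single positional comprehension
-- over range(2*n) selecting mask[i//2] / color[i//2] by parity (alternative decomposition).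
-- Both programs raise ValueError when the lengths differ; Pre_ excludes exactly that.

-- ===== PORT A =====
-- for c, m in zip(color, mask): out.append(m); out.append(c)
def combine_interleaved (color : List Int) (mask : List Int) : List Int :=
  (color.zip mask).foldl (fun out cm => out ++ [cm.2, cm.1]) []

-- ===== PORT B =====
-- [mask[i // 2] if i % 2 == 0 else color[i // 2] for i in range(2 * len(color))]
-- `.getD 0` is exact: under Pre_ (equal lengths) i // 2 is always in range, so the
-- Python indexing never raises.
def combine_interleaved_alt (color : List Int) (mask : List Int) : List Int :=
  (PySem.List.pyRange 0 (2 * (color.length : Int)) 1).map (fun i =>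
    if PySem.Int.mod i 2 = 0 then
      (PySem.List.pyGet? mask (PySem.Int.floordiv i 2)).getD 0
    else
      (PySem.List.pyGet? color (PySem.Int.floordiv i 2)).getD 0)

-- ===== PRECONDITION & SPEC =====
-- A raises ValueError when the two lists have different lengths; Pre_ excludes exactly those inputs.
def Pre_combine_interleaved (color : List Int) (mask : List Int) : Prop :=
  color.length = mask.length
instance (color : List Int) (mask : List Int) : Decidable (Pre_combine_interleaved color mask) := by
  unfold Pre_combine_interleaved; infer_instance
def pvWitness_combine_interleaved : List Int × List Int := ([1, 2, 3], [10, 20, 30])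

def Spec_combine_interleaved (color : List Int) (mask : List Int) (out : List Int) : Prop := out = combine_interleaved_alt color mask
instance (color : List Int) (mask : List Int) (out : List Int) : Decidable (Spec_combine_interleaved color mask out) := by unfold Spec_combine_interleaved; infer_instance

-- ===== CLAIM (what is proved, stated in full; the proofs are below) =====
def Claim_equal_combine_interleaved : Prop := ∀ (color : List Int) (mask : List Int), Dom_combine_interleaved color mask → Pre_combine_interleaved color mask → Spec_combine_interleaved color mask (combine_interleaved color mask)

-- ===== LEMMAS AND PROOFS =====

/-- Reference interleaving of a zipped list: `m :: c :: ...` per pair. -/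
def pvInter : List (Int × Int) → List Int
  | [] => []
  | (c, m) :: ps => m :: c :: pvInter ps

theorem pvA_foldl (ps : List (Int × Int)) (acc : List Int) :
    ps.foldl (fun out cm => out ++ [cm.2, cm.1]) acc = acc ++ pvInter ps := by
  induction ps generalizing acc with
  | nil => simp [pvInter]
  | cons p ps ih => cases p; simp [List.foldl, pvInter, ih]

theorem pvInter_get? (ps : List (Int × Int)) (k : Nat) :
    (pvInter ps)[k]? = (ps[k / 2]?).map (fun p => if k % 2 = 0 then p.2 else p.1) := by
  induction ps generalizing k with
  | nil => simp [pvInter]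
  | cons p ps ih =>
    cases p with
    | mk c m =>
      match k with
      | 0 => simp [pvInter]
      | 1 => simp [pvInter]
      | (j + 2) =>
        have hmod : (j + 2) % 2 = j % 2 := by omega
        have hdiv : (j + 2) / 2 = j / 2 + 1 := by omega
        simp only [pvInter, List.getElem?_cons_succ, hmod, hdiv]
        exact ih j

theorem combine_interleaved_spec : Claim_equal_combine_interleaved := by
  intro color mask _ hpre
  unfold Spec_combine_interleaved combine_interleaved combine_interleaved_alt
  unfold Pre_combine_interleaved at hpre
  rw [pvA_foldl, List.nil_append]
  have hcast : 2 * (color.length : Int) = ((2 * color.length : Nat) : Int) := by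
    push_cast; ring
  rw [hcast]
  apply List.ext_getElem?
  intro k
  rw [pvInter_get?]
  by_cases hk : k < 2 * color.length
  · rw [PySem.List.getElem?_map_pyRange_zero _ _ _ hk]
    have hkz : k / 2 < color.length := by omega
    have hkm : k / 2 < mask.length := by omega
    have hzip : (color.zip mask)[k / 2]? = some (color[k / 2]'hkz, mask[k / 2]'hkm) := by
      simp [hkz, hkm]
    rw [hzip]
    rw [show PySem.Int.mod ((k : Nat) : Int) 2 = ((k % 2 : Nat) : Int) from
          PySem.Int.mod_natCast k 2,
        show PySem.Int.floordiv ((k : Nat) : Int) 2 = ((k / 2 : Nat) : Int) from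
          PySem.Int.floordiv_natCast k 2,
        PySem.List.pyGet?_natCast, PySem.List.pyGet?_natCast]
    by_cases hpar : k % 2 = 0
    · simp [hpar, hkm]
    · have hnd : ¬ ((2 : Int) ∣ (k : Int)) := by omega
      simp [hpar, hnd, hkz]
  · have hz : (color.zip mask)[k / 2]? = none := by
      rw [List.getElem?_eq_none]
      simp only [List.length_zip, ← hpre, Nat.min_self]
      omega
    have hb : (List.map (fun i =>
        if PySem.Int.mod i 2 = 0 then (PySem.List.pyGet? mask (PySem.Int.floordiv i 2)).getD 0
        else (PySem.List.pyGet? color (PySem.Int.floordiv i 2)).getD 0)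
        (PySem.List.pyRange 0 ((2 * color.length : Nat) : Int) 1))[k]? = none := by
      rw [List.getElem?_eq_none]
      simp [PySem.List.length_pyRange_one]
      omega
    rw [hz, hb]
    simp
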